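-- pv_equiv track=rewrite | github.com/timrozday-mgnify/genome-blender | scripts/reconstruct_sequences.py | align_read_to_path
-- ===== SOURCE A (Python) =====
-- from collections import Counter, defaultdict
-- from typing import Annotated, Final, Literal
--
-- def _chain_dp(
--     path_min_ids: list[int],
--     query_min_ids: list[int],
--     gap_tolerance: int,
-- ) -> list[tuple[int, int]]:
--     """Run linear-chaining DP on (path_pos, query_pos) anchors.
--
--     Anchors are generated where ``path_min_ids[path_pos] == query_min_ids[query_pos]``.
--     The DP finds the longest chain of anchors that is strictly monotone in both
--     coordinates and satisfies ``|path_diff − query_diff| ≤ gap_tolerance``.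
--
--     Args:
--         path_min_ids: Ordered minimizer hashes of the target path.
--         query_min_ids: Ordered minimizer hashes of the query read (one strand).
--         gap_tolerance: Maximum allowed deviation between path and query offsets.
--
--     Returns:
--         Sorted list of ``(path_pos, query_pos)`` anchor pairs in the best chain.
--     """
--     path_hash_to_pos: dict[int, list[int]] = defaultdict(list)
--     for i, h in enumerate(path_min_ids):
--         path_hash_to_pos[h].append(i)
--
--     anchors: list[tuple[int, int]] = []
--     for qpos, h in enumerate(query_min_ids):
--         for ppos in path_hash_to_pos.get(int(h), []):
--             anchors.append((ppos, qpos))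
--
--     if not anchors:
--         return []
--
--     anchors.sort()
--     n = len(anchors)
--     dp = [1] * n
--     prev = [-1] * n
--
--     for i in range(1, n):
--         pi, qi = anchors[i]
--         best_score = 1
--         best_j = -1
--         for j in range(i - 1, -1, -1):
--             pj, qj = anchors[j]
--             if pj >= pi or qj >= qi:
--                 continue
--             if abs((pi - pj) - (qi - qj)) <= gap_tolerance:
--                 cand = dp[j] + 1
--                 if cand > best_score:
--                     best_score = cand
--                     best_j = j
--         dp[i] = best_score
--         prev[i] = best_j
--
--     best_end = max(range(n), key=lambda x: dp[x])
--     chain: list[tuple[int, int]] = []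
--     idx = best_end
--     while idx >= 0:
--         chain.append(anchors[idx])
--         idx = prev[idx]
--     chain.reverse()
--     return chain
--
-- def align_read_to_path(
--     path_min_ids: list[int],
--     read_min_ids: list[int],
--     gap_tolerance: int = 0,
-- ) -> tuple[list[tuple[int, int]], Literal["+", "-"]]:
--     """Align a read to a path in minimizer space, trying both strands.
--
--     Chain coordinates are always reported in terms of the read's original
--     (un-reversed) minimizer indices, even for reverse-strand alignments.
--
--     Args:
--         path_min_ids: Ordered minimizer hashes of the path.
--         read_min_ids: Ordered minimizer hashes of the read (forward strand).
--         gap_tolerance: Maximum offset difference allowed for chaining.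
--
--     Returns:
--         A tuple ``(chain, strand)`` where ``chain`` is a list of
--         ``(path_pos, read_min_idx)`` pairs sorted by path_pos, and ``strand``
--         is ``"+"`` or ``"-"``.
--     """
--     n = len(read_min_ids)
--     fwd_chain = _chain_dp(path_min_ids, read_min_ids, gap_tolerance)
--     rev_chain_rev = _chain_dp(path_min_ids, list(reversed(read_min_ids)), gap_tolerance)
--     # Convert reversed-array indices back to original read indices.
--     rev_chain = [(p, n - 1 - r) for p, r in rev_chain_rev]
--
--     if len(fwd_chain) >= len(rev_chain_rev):
--         return fwd_chain, "+"
--     return rev_chain, "-"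
-- ===== SOURCE B (Python) =====
-- def _best_chain(path_min_ids, query_min_ids, gap_tolerance):
--     """For each anchor keep the best chain ENDING there as an explicit list:
--     no dp/prev score tables and no backtracking pass are needed."""
--     path_pos = {}
--     for i, h in enumerate(path_min_ids):
--         path_pos.setdefault(h, []).append(i)
--     anchors = sorted(
--         (p, q) for q, h in enumerate(query_min_ids) for p in path_pos.get(h, [])
--     )
--     best = []
--     chains = []
--     for p, q in anchors:
--         pick = []
--         for c in chains:
--             lp, lq = c[-1]
--             if lp < p and lq < q and abs((p - lp) - (q - lq)) <= gap_tolerance \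
--                     and len(c) >= len(pick):
--                 pick = c
--         cur = pick + [(p, q)]
--         chains.append(cur)
--         if len(best) < len(cur):
--             best = cur
--     return best
--
--
-- def align_read_to_path(path_min_ids, read_min_ids, gap_tolerance=0):
--     n = len(read_min_ids)
--     fwd = _best_chain(path_min_ids, read_min_ids, gap_tolerance)
--     rev = _best_chain(path_min_ids, read_min_ids[::-1], gap_tolerance)
--     if len(fwd) >= len(rev):
--         return fwd, "+"
--     return [(p, n - 1 - r) for p, r in rev], "-"
-- ===== Notes on version B (the rewrite author's own statement) =====
-- stated objective: alternative
-- what changed: Instead of A's score/parent DP (dp and prev arrays filled by a backward predecessor scan, argmax selection of best_end, then a backtracking while-loop plus reverse), B materializes for each anchor the best chain ending there as an explicit list, picking the predecessor chain by scanning the already-built chains, and keeps a running overall best chain, so the dp/prev tables, the best_end argmax pass and the backtracking reconstruction disappear.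
import Mathlib
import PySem

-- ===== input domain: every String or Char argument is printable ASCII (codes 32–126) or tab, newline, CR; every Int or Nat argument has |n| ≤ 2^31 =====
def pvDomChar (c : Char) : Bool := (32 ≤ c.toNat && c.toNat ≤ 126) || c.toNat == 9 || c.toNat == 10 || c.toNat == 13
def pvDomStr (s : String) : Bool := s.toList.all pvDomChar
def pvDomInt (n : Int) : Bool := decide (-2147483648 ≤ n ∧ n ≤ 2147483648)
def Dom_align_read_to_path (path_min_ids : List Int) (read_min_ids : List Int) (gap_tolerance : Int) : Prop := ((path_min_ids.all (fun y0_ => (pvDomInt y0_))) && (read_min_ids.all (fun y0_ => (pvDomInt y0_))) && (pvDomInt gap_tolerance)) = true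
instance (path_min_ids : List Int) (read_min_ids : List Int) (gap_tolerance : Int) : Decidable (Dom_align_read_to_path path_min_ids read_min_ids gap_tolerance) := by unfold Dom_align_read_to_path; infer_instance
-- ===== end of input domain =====

-- B drops A's dp/prev score tables, best_end selection and backtracking pass: it materializes, for
-- each anchor, the best chain ending there as an explicit list and keeps a running overall best
-- (an alternative O(n^2) formulation of the same chaining).

-- ===== PORT A =====

-- A's inner predecessor scan: `for j in range(i-1, -1, -1): ...` producing (best_score, best_j)
def pvInnerA (sa : List (Int × Int)) (g : Int) (dp : List Int) (i : Int) : Int × Int :=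
  let a := PySem.List.pyGetD sa i (0, 0)
  (PySem.List.pyRange (i - 1) (-1) (-1)).foldl (fun (bs : Int × Int) j =>
      let b := PySem.List.pyGetD sa j (0, 0)
      if a.1 ≤ b.1 ∨ a.2 ≤ b.2 then bs
      else if |(a.1 - b.1) - (a.2 - b.2)| ≤ g then
        (if PySem.List.pyGetD dp j 0 + 1 > bs.1 then (PySem.List.pyGetD dp j 0 + 1, j) else bs)
      else bs) (1, -1)

-- A's outer loop body: dp[i] = best_score; prev[i] = best_j
def pvOuterA (sa : List (Int × Int)) (g : Int) (st : List Int × List Int) (i : Int) :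
    List Int × List Int :=
  let r := pvInnerA sa g st.1 i
  (PySem.List.pySetD st.1 i r.1, PySem.List.pySetD st.2 i r.2)

-- A's chain reconstruction: `while idx >= 0: chain.append(anchors[idx]); idx = prev[idx]`
-- (fuel bounds the loop; n+1 steps always suffice for the actual run)
def pvReconA (sa : List (Int × Int)) (prev : List Int) : Nat → Int → List (Int × Int) → List (Int × Int)
  | 0, _, acc => acc
  | fuel + 1, idx, acc =>
      if 0 ≤ idx then
        pvReconA sa prev fuel (PySem.List.pyGetD prev idx (-1)) (acc ++ [PySem.List.pyGetD sa idx (0, 0)])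
      else acc

-- _chain_dp
def pvChainDpA (path_min_ids : List Int) (query_min_ids : List Int) (gap_tolerance : Int) :
    List (Int × Int) :=
  let d : PySem.Dict Int (List Int) :=
    (PySem.List.enumerate path_min_ids 0).foldl
      (fun d p => d.modify p.2 [] (fun l => l ++ [p.1])) PySem.Dict.empty
  let anchors : List (Int × Int) :=
    (PySem.List.enumerate query_min_ids 0).foldl
      (fun acc p => (d.getD p.2 []).foldl (fun acc2 pp => acc2 ++ [(pp, p.1)]) acc) []
  if anchors = [] then []
  else
    let sa := PySem.List.sorted2 anchors Prod.fst Prod.snd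
    let n := sa.length
    let st := (PySem.List.pyRange 1 (n : Int) 1).foldl (pvOuterA sa gap_tolerance)
      (List.replicate n 1, List.replicate n (-1))
    let best_end := (PySem.List.max? (PySem.List.pyRange 0 (n : Int) 1)
      (fun x => PySem.List.pyGetD st.1 x 0)).getD 0
    (pvReconA sa st.2 (n + 1) best_end []).reverse

def align_read_to_path (path_min_ids : List Int) (read_min_ids : List Int) (gap_tolerance : Int) : (List (Int × Int)) × String :=
  let n := read_min_ids.length
  let fwd_chain := pvChainDpA path_min_ids read_min_ids gap_tolerance
  let rev_chain_rev := pvChainDpA path_min_ids read_min_ids.reverse gap_tolerance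
  let rev_chain := rev_chain_rev.map (fun pr => (pr.1, (n : Int) - 1 - pr.2))
  if rev_chain_rev.length ≤ fwd_chain.length then (fwd_chain, "+") else (rev_chain, "-")

-- ===== PORT B =====

-- B's inner scan body: `lp, lq = c[-1]; if ... and len(c) >= len(pick): pick = c`
def pvPkStep (g : Int) (a : Int × Int) (pick c : List (Int × Int)) : List (Int × Int) :=
  let l := PySem.List.pyGetD c (-1) ((0 : Int), (0 : Int))
  if l.1 < a.1 ∧ l.2 < a.2 ∧ |(a.1 - l.1) - (a.2 - l.2)| ≤ g ∧ pick.length ≤ c.length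
  then c else pick

-- B's inner scan: `for c in chains: ...`
def pvPickB (g : Int) (a : Int × Int) (chains : List (List (Int × Int))) : List (Int × Int) :=
  chains.foldl (pvPkStep g a) []

-- B's loop body: cur = pick + [(p, q)]; chains.append(cur); best update
def pvStepChainB (g : Int) (st : List (List (Int × Int)) × List (Int × Int)) (a : Int × Int) :
    List (List (Int × Int)) × List (Int × Int) :=
  let cur := pvPickB g a st.1 ++ [a]
  (st.1 ++ [cur], if st.2.length < cur.length then cur else st.2)

-- _best_chain
def pvBestChainB (path_min_ids : List Int) (query_min_ids : List Int) (gap_tolerance : Int) :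
    List (Int × Int) :=
  let path_pos : PySem.Dict Int (List Int) :=
    (PySem.List.enumerate path_min_ids 0).foldl
      (fun d p => d.modify p.2 [] (fun l => l ++ [p.1])) PySem.Dict.empty
  let anchors := PySem.List.sorted2
    ((PySem.List.enumerate query_min_ids 0).flatMap
      (fun p => (path_pos.getD p.2 []).map (fun pp => (pp, p.1))))
    Prod.fst Prod.snd
  (anchors.foldl (pvStepChainB gap_tolerance) ([], [])).2

def align_read_to_path_alt (path_min_ids : List Int) (read_min_ids : List Int) (gap_tolerance : Int) : (List (Int × Int)) × String :=
  let n := read_min_ids.length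
  let fwd := pvBestChainB path_min_ids read_min_ids gap_tolerance
  let rev := pvBestChainB path_min_ids read_min_ids.reverse gap_tolerance
  if rev.length ≤ fwd.length then (fwd, "+")
  else (rev.map (fun pr => (pr.1, (n : Int) - 1 - pr.2)), "-")

-- ===== PRECONDITION & SPEC =====
def Spec_align_read_to_path (path_min_ids : List Int) (read_min_ids : List Int) (gap_tolerance : Int) (out : (List (Int × Int)) × String) : Prop := out = align_read_to_path_alt path_min_ids read_min_ids gap_tolerance
instance (path_min_ids : List Int) (read_min_ids : List Int) (gap_tolerance : Int) (out : (List (Int × Int)) × String) : Decidable (Spec_align_read_to_path path_min_ids read_min_ids gap_tolerance out) := by unfold Spec_align_read_to_path; infer_instance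

-- ===== CLAIM (what is proved, stated in full; the proofs are below) =====
def Claim_equal_align_read_to_path : Prop := ∀ (path_min_ids : List Int) (read_min_ids : List Int) (gap_tolerance : Int), Dom_align_read_to_path path_min_ids read_min_ids gap_tolerance → Spec_align_read_to_path path_min_ids read_min_ids gap_tolerance (align_read_to_path path_min_ids read_min_ids gap_tolerance)

-- ===== LEMMAS AND PROOFS =====

-- the chaining validity test: anchor at index p may precede anchor at index t
def pvVld (sa : List (Int × Int)) (g : Int) (p t : Int) : Bool :=
  decide ((PySem.List.pyGetD sa p (0, 0)).1 < (PySem.List.pyGetD sa t (0, 0)).1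
    ∧ (PySem.List.pyGetD sa p (0, 0)).2 < (PySem.List.pyGetD sa t (0, 0)).2
    ∧ |((PySem.List.pyGetD sa t (0, 0)).1 - (PySem.List.pyGetD sa p (0, 0)).1)
        - ((PySem.List.pyGetD sa t (0, 0)).2 - (PySem.List.pyGetD sa p (0, 0)).2)| ≤ g)

-- generic ascending ">=" relax step and descending ">" scan step
def pvStepGE (v : Int → Bool) (f : Int → Int) (s : Int × Int) (j : Int) : Int × Int :=
  if v j = true ∧ f j ≥ s.1 then (f j, j) else s

def pvStepGT (v : Int → Bool) (f : Int → Int) (s : Int × Int) (j : Int) : Int × Int :=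
  if v j = true then (if f j > s.1 then (f j, j) else s) else s

theorem pvFoldGE_mono (v : Int → Bool) (f : Int → Int) (l : List Int) (s : Int × Int) :
    s.1 ≤ (l.foldl (pvStepGE v f) s).1 := by
  induction l generalizing s with
  | nil => simp
  | cons x t ih =>
    simp only [List.foldl_cons]
    refine le_trans ?_ (ih _)
    unfold pvStepGE
    split
    · next h => exact h.2
    · exact le_refl _

theorem pvFoldGE_ge (v : Int → Bool) (f : Int → Int) (l : List Int) (s : Int × Int)
    (j : Int) (hj : j ∈ l) (hv : v j = true) : f j ≤ (l.foldl (pvStepGE v f) s).1 := by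
  induction l generalizing s with
  | nil => simp at hj
  | cons x t ih =>
    simp only [List.foldl_cons]
    rcases List.mem_cons.mp hj with rfl | hjt
    · by_cases hc : f j ≥ s.1
      · have : pvStepGE v f s j = (f j, j) := by unfold pvStepGE; simp [hv, hc]
        rw [this]
        exact pvFoldGE_mono v f t (f j, j)
      · have : pvStepGE v f s j = s := by unfold pvStepGE; simp [hv, hc]
        rw [this]
        exact le_trans (by omega) (pvFoldGE_mono v f t s)
    · exact ih _ hjt

-- the fold either keeps its seed or ends on a visited index with its score
theorem pvFoldGE_cases (v : Int → Bool) (f : Int → Int) (l : List Int) (s : Int × Int) :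
    l.foldl (pvStepGE v f) s = s
    ∨ ((l.foldl (pvStepGE v f) s).2 ∈ l ∧ (l.foldl (pvStepGE v f) s).1 = f (l.foldl (pvStepGE v f) s).2) := by
  induction l generalizing s with
  | nil => left; rfl
  | cons x t ih =>
    simp only [List.foldl_cons]
    by_cases hc : v x = true ∧ f x ≥ s.1
    · have hstep : pvStepGE v f s x = (f x, x) := by unfold pvStepGE; simp [hc.1, hc.2]
      rw [hstep]
      rcases ih (f x, x) with h | h
      · right; rw [h]; exact ⟨List.mem_cons_self, rfl⟩
      · right; exact ⟨List.mem_cons_of_mem _ h.1, h.2⟩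
    · have hstep : pvStepGE v f s x = s := by unfold pvStepGE; rw [if_neg hc]
      rw [hstep]
      rcases ih s with h | h
      · left; exact h
      · right; exact ⟨List.mem_cons_of_mem _ h.1, h.2⟩

theorem pvFoldGE_const (v : Int → Bool) (f : Int → Int) (l : List Int) (c x : Int)
    (h : ∀ j ∈ l, v j = true → f j < c) : l.foldl (pvStepGE v f) (c, x) = (c, x) := by
  induction l with
  | nil => rfl
  | cons y t ih =>
    simp only [List.foldl_cons]
    have hstep : pvStepGE v f (c, x) y = (c, x) := by
      unfold pvStepGE
      split
      · next hc =>
        exact absurd (h y (List.mem_cons_self) hc.1) (not_lt.mpr hc.2)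
      · rfl
    rw [hstep]
    exact ih (fun j hj hv => h j (List.mem_cons_of_mem _ hj) hv)

theorem pvFoldGE_lt (v : Int → Bool) (f : Int → Int) (l : List Int) (s : Int × Int) (c : Int)
    (h : ∀ j ∈ l, v j = true → f j < c) (hs : s.1 < c) : (l.foldl (pvStepGE v f) s).1 < c := by
  induction l generalizing s with
  | nil => simpa
  | cons y t ih =>
    simp only [List.foldl_cons]
    refine ih _ (fun j hj hv => h j (List.mem_cons_of_mem _ hj) hv) ?_
    unfold pvStepGE
    split
    · next hc => exact h y (List.mem_cons_self) hc.1
    · exact hs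

theorem pvFoldGE_init (v : Int → Bool) (f : Int → Int) (l : List Int) (s : Int × Int) (c x : Int)
    (hs : s.1 < c) (h : ∃ j ∈ l, v j = true ∧ c ≤ f j) :
    l.foldl (pvStepGE v f) (c, x) = l.foldl (pvStepGE v f) s := by
  induction l generalizing s x with
  | nil => simp at h
  | cons y t ih =>
    simp only [List.foldl_cons]
    by_cases hy : v y = true ∧ c ≤ f y
    · have h1 : pvStepGE v f (c, x) y = (f y, y) := by unfold pvStepGE; simp [hy.1]; omega
      have h2 : pvStepGE v f s y = (f y, y) := by unfold pvStepGE; simp [hy.1]; omega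
      rw [h1, h2]
    · obtain ⟨j, hj, hvj, hcj⟩ := h
      have hjt : j ∈ t := by
        rcases List.mem_cons.mp hj with rfl | hjt
        · exact absurd ⟨hvj, hcj⟩ hy
        · exact hjt
      have h1 : pvStepGE v f (c, x) y = (c, x) := by
        unfold pvStepGE
        split
        · next hc => exact absurd ⟨hc.1, by have := hc.2; omega⟩ hy
        · rfl
      rw [h1]
      have hlt : (pvStepGE v f s y).1 < c := by
        unfold pvStepGE
        split
        · next hc =>
          have h3 : ¬ c ≤ f y := fun hle => hy ⟨hc.1, hle⟩
          show f y < c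
          omega
        · exact hs
      exact ih _ _ hlt ⟨j, hjt, hvj, hcj⟩

-- descending strict-> scan = ascending >= relax (both pick the greatest argmax)
theorem pvFoldGT_rev_eq_foldGE (v : Int → Bool) (f : Int → Int) (l : List Int) (s : Int × Int)
    (h : ∀ j ∈ l, v j = true → s.1 < f j) :
    l.reverse.foldl (pvStepGT v f) s = l.foldl (pvStepGE v f) s := by
  induction l with
  | nil => rfl
  | cons x t ih =>
    have hrev : (x :: t).reverse = t.reverse ++ [x] := by simp
    rw [hrev, List.foldl_append,
      ih (fun j hj hv => h j (List.mem_cons_of_mem _ hj) hv)]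
    simp only [List.foldl_cons, List.foldl_nil]
    by_cases hvx : v x = true
    · have hfx : s.1 < f x := h x (List.mem_cons_self) hvx
      have hstep : pvStepGE v f s x = (f x, x) := by unfold pvStepGE; simp [hvx]; omega
      rw [hstep]
      by_cases hex : ∃ j ∈ t, v j = true ∧ f x ≤ f j
      · rw [pvFoldGE_init v f t s (f x) x hfx hex]
        obtain ⟨j, hj, hvj, hle⟩ := hex
        have hge := pvFoldGE_ge v f t s j hj hvj
        unfold pvStepGT
        simp [hvx]
        omega
      · push Not at hex
        have hall : ∀ j ∈ t, v j = true → f j < f x := by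
          intro j hj hvj
          have := hex j hj hvj
          omega
        rw [pvFoldGE_const v f t (f x) x hall]
        have hlt := pvFoldGE_lt v f t s (f x) hall hfx
        unfold pvStepGT
        simp [hvx]
        omega
    · have h1 : pvStepGE v f s x = s := by unfold pvStepGE; simp [hvx]
      have h2 : ∀ z : Int × Int, pvStepGT v f z x = z := by
        intro z; unfold pvStepGT; simp [hvx]
      rw [h1, h2]

-- the DP table, built index by index (bps sa g k lists (dp, prev) for indices [0, k))
def pvBps (sa : List (Int × Int)) (g : Int) : Nat → List (Int × Int)
  | 0 => []
  | k + 1 =>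
      let L := pvBps sa g k
      L ++ [(PySem.List.pyRange 0 (k : Int) 1).foldl
        (pvStepGE (fun j => pvVld sa g j (k : Int)) (fun j => (L.getD j.toNat (0, 0)).1 + 1)) (1, -1)]

def pvBpAt (sa : List (Int × Int)) (g : Int) (k : Nat) : Int × Int :=
  (pvBps sa g (k + 1)).getD k (0, 0)

def pvDpS (sa : List (Int × Int)) (g : Int) (k : Nat) : Int := (pvBpAt sa g k).1

theorem pvLength_bps (sa : List (Int × Int)) (g : Int) (k : Nat) : (pvBps sa g k).length = k := by
  induction k with
  | zero => rfl
  | succ k ih => unfold pvBps; simp [ih]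

theorem pvGetD_bps (sa : List (Int × Int)) (g : Int) (k m : Nat) (h : k < m) :
    (pvBps sa g m).getD k (0, 0) = pvBpAt sa g k := by
  induction m with
  | zero => omega
  | succ m ih =>
    by_cases hk : k < m
    · unfold pvBps
      rw [← ih hk]
      simp only [List.getD_eq_getElem?_getD]
      rw [List.getElem?_append_left (by rw [pvLength_bps]; exact hk)]
    · have hk' : k = m := by omega
      subst hk'
      rfl

theorem pvBpAt_char (sa : List (Int × Int)) (g : Int) (k : Nat) :
    pvBpAt sa g k = (PySem.List.pyRange 0 (k : Int) 1).foldl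
      (pvStepGE (fun j => pvVld sa g j (k : Int)) (fun j => pvDpS sa g j.toNat + 1)) (1, -1) := by
  have hsucc : pvBps sa g (k + 1) = pvBps sa g k ++ [(PySem.List.pyRange 0 (k : Int) 1).foldl
      (pvStepGE (fun j => pvVld sa g j (k : Int))
        (fun j => ((pvBps sa g k).getD j.toNat (0, 0)).1 + 1)) (1, -1)] := rfl
  have hbp : pvBpAt sa g k = (PySem.List.pyRange 0 (k : Int) 1).foldl
      (pvStepGE (fun j => pvVld sa g j (k : Int))
        (fun j => ((pvBps sa g k).getD j.toNat (0, 0)).1 + 1)) (1, -1) := by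
    unfold pvBpAt
    rw [hsucc]
    simp only [List.getD_eq_getElem?_getD]
    rw [List.getElem?_append_right (by rw [pvLength_bps])]
    simp [pvLength_bps]
  rw [hbp]
  apply PySem.List.foldl_congr_mem
  intro acc j hj
  have hj' := (PySem.List.mem_pyRange_one).mp hj
  have hlt : j.toNat < k := by omega
  unfold pvStepGE
  beta_reduce
  rw [pvGetD_bps sa g j.toNat k hlt]
  rfl

theorem pvOne_le_dpS (sa : List (Int × Int)) (g : Int) (k : Nat) : 1 ≤ pvDpS sa g k := by
  unfold pvDpS
  rw [pvBpAt_char]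
  exact pvFoldGE_mono _ _ _ (1, -1)

-- dp/prev at index k: either untouched seed or a valid predecessor in [0, k)
theorem pvPrev_cases (sa : List (Int × Int)) (g : Int) (k : Nat) :
    pvBpAt sa g k = (1, -1)
    ∨ (0 ≤ (pvBpAt sa g k).2 ∧ (pvBpAt sa g k).2 < (k : Int)
        ∧ (pvBpAt sa g k).1 = pvDpS sa g (pvBpAt sa g k).2.toNat + 1) := by
  rw [pvBpAt_char]
  rcases pvFoldGE_cases (fun j => pvVld sa g j (k : Int)) (fun j => pvDpS sa g j.toNat + 1)
      (PySem.List.pyRange 0 (k : Int) 1) (1, -1) with h | h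
  · left; exact h
  · right
    have hm := PySem.List.mem_pyRange_one.mp h.1
    exact ⟨hm.1, hm.2, h.2⟩

theorem pvPyGetD_map_range (fn : Nat → Int) (n : Nat) (j : Int) (h0 : 0 ≤ j) (hj : j < (n : Int))
    (d : Int) : PySem.List.pyGetD ((List.range n).map fn) j d = fn j.toNat := by
  rw [PySem.List.pyGetD_eq_getElem _ d h0 (by simpa using hj)]
  have hjt : j.toNat < n := by omega
  simp

theorem pvPySetD_map_range (fn : Nat → Int) (n m : Nat) (hm : m < n) (v : Int) :
    PySem.List.pySetD ((List.range n).map fn) (m : Int) v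
      = (List.range n).map (fun k => if k = m then v else fn k) := by
  rw [PySem.List.pySetD_natCast]
  apply List.ext_getElem (by simp)
  intro i h1 h2
  simp only [List.getElem_set, List.getElem_map, List.getElem_range]
  rcases eq_or_ne i m with rfl | hne
  · simp
  · simp [hne, Ne.symm hne]

-- A's dp/prev lists after processing outer indices [1, m)
def pvDlA (sa : List (Int × Int)) (g : Int) (n m : Nat) : List Int :=
  (List.range n).map (fun k => if k < m then pvDpS sa g k else 1)

def pvPlA (sa : List (Int × Int)) (g : Int) (n m : Nat) : List Int :=
  (List.range n).map (fun k => if k < m then (pvBpAt sa g k).2 else -1)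

theorem pvBpAt_zero (sa : List (Int × Int)) (g : Int) : pvBpAt sa g 0 = (1, -1) := by
  rw [pvBpAt_char]
  simp [PySem.List.pyRange_one_eq_nil (le_refl (0 : Int))]

theorem pvInnerA_eq (sa : List (Int × Int)) (g : Int) (m : Nat) (hm : m ≤ sa.length) :
    pvInnerA sa g (pvDlA sa g sa.length m) (m : Int) = pvBpAt sa g m := by
  have hgetDl : ∀ (j : Int), 0 ≤ j → j < (m : Int) →
      PySem.List.pyGetD (pvDlA sa g sa.length m) j 0 = pvDpS sa g j.toNat := by
    intro j h0 hj
    unfold pvDlA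
    rw [pvPyGetD_map_range _ _ _ h0 (by exact_mod_cast lt_of_lt_of_le hj (by exact_mod_cast hm)) 0]
    have : j.toNat < m := by omega
    simp [this]
  simp only [pvInnerA]
  have hrange : PySem.List.pyRange ((m : Int) - 1) (-1) (-1)
      = (PySem.List.pyRange 0 (m : Int) 1).reverse := by
    rw [PySem.List.pyRange_neg_one_eq_reverse]
    norm_num
  rw [hrange]
  rw [PySem.List.foldl_congr_mem _ _
    (pvStepGT (fun j => pvVld sa g j (m : Int))
      (fun j => PySem.List.pyGetD (pvDlA sa g sa.length m) j 0 + 1)) _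
    (by
      intro acc j hj
      simp only [pvStepGT, pvVld, decide_eq_true_eq]
      generalize (|((PySem.List.pyGetD sa (m : Int) (0, 0)).1 - (PySem.List.pyGetD sa j (0, 0)).1)
        - ((PySem.List.pyGetD sa (m : Int) (0, 0)).2 - (PySem.List.pyGetD sa j (0, 0)).2)| : Int) = A
      split_ifs <;> first | rfl | omega)]
  rw [pvFoldGT_rev_eq_foldGE _ _ _ _
    (by
      intro j hj hv
      have hjm := PySem.List.mem_pyRange_one.mp hj
      have := pvOne_le_dpS sa g j.toNat
      rw [hgetDl j hjm.1 hjm.2]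
      simp
      omega)]
  rw [PySem.List.foldl_congr_mem _ _
    (pvStepGE (fun j => pvVld sa g j (m : Int)) (fun j => pvDpS sa g j.toNat + 1)) _
    (by
      intro acc j hj
      have hjm := PySem.List.mem_pyRange_one.mp hj
      unfold pvStepGE
      beta_reduce
      rw [hgetDl j hjm.1 hjm.2])]
  rw [← pvBpAt_char]

theorem pvA_loop (sa : List (Int × Int)) (g : Int) (m : Nat) (hm : m ≤ sa.length) :
    (PySem.List.pyRange 1 (m : Int) 1).foldl (pvOuterA sa g)
      (List.replicate sa.length 1, List.replicate sa.length (-1))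
    = (pvDlA sa g sa.length m, pvPlA sa g sa.length m) := by
  revert hm
  induction m with
  | zero =>
    intro hm
    rw [PySem.List.pyRange_one_eq_nil (by norm_num)]
    simp only [List.foldl_nil, Prod.mk.injEq]
    constructor <;>
      (apply List.ext_getElem (by simp [pvDlA, pvPlA]) ; intro i h1 h2 ; simp [pvDlA, pvPlA])
  | succ m ih =>
    intro hm
    by_cases hm0 : m = 0
    · subst hm0
      rw [PySem.List.pyRange_one_eq_nil (by norm_num)]
      simp only [List.foldl_nil, Prod.mk.injEq]
      constructor <;>
        (apply List.ext_getElem (by simp [pvDlA, pvPlA]) ; intro i h1 h2 ;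
         simp only [pvDlA, pvPlA, List.getElem_replicate, List.getElem_map, List.getElem_range] ;
         rcases Nat.eq_zero_or_pos i with rfl | hi)
      · simp [pvDpS, pvBpAt_zero]
      · simp; omega
      · simp [pvBpAt_zero]
      · simp; omega
    · have hcast : ((m + 1 : Nat) : Int) = (m : Int) + 1 := by push_cast; ring
      rw [hcast, PySem.List.pyRange_one_succ_right (by exact_mod_cast Nat.one_le_iff_ne_zero.mpr hm0),
        List.foldl_append, ih (by omega)]
      simp only [List.foldl_cons, List.foldl_nil]
      unfold pvOuterA
      rw [pvInnerA_eq sa g m (by omega)]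
      simp only [Prod.mk.injEq]
      constructor
      · unfold pvDlA
        rw [pvPySetD_map_range _ _ m (by omega)]
        apply List.map_congr_left
        intro k hk
        rcases eq_or_ne k m with rfl | hne
        · simp [pvDpS]
        · simp only [if_neg hne]
          split_ifs <;> first | rfl | omega
      · unfold pvPlA
        rw [pvPySetD_map_range _ _ m (by omega)]
        apply List.map_congr_left
        intro k hk
        rcases eq_or_ne k m with rfl | hne
        · simp
        · simp only [if_neg hne]
          split_ifs <;> first | rfl | omega

-- the ideal chain ending at anchor k, defined with fuel (prev strictly decreases)
def pvWf (sa : List (Int × Int)) (g : Int) : Nat → Nat → List (Int × Int)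
  | 0, _ => []
  | fuel + 1, k =>
      (if 0 ≤ (pvBpAt sa g k).2 then pvWf sa g fuel (pvBpAt sa g k).2.toNat else [])
        ++ [PySem.List.pyGetD sa (k : Int) (0, 0)]

def pvW (sa : List (Int × Int)) (g : Int) (k : Nat) : List (Int × Int) := pvWf sa g (k + 1) k

theorem pvWf_congr (sa : List (Int × Int)) (g : Int) :
    ∀ k f1 f2, k < f1 → k < f2 → pvWf sa g f1 k = pvWf sa g f2 k := by
  intro k
  induction k using Nat.strong_induction_on with
  | _ k ih =>
    intro f1 f2 h1 h2
    match f1, f2 with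
    | f1 + 1, f2 + 1 =>
      simp only [pvWf]
      by_cases h0 : 0 ≤ (pvBpAt sa g k).2
      · rw [if_pos h0, if_pos h0]
        rcases pvPrev_cases sa g k with h | h
        · rw [h] at h0; omega
        · have hlt : (pvBpAt sa g k).2.toNat < k := by omega
          rw [ih _ hlt f1 f2 (by omega) (by omega)]
      · rw [if_neg h0, if_neg h0]

theorem pvW_rec (sa : List (Int × Int)) (g : Int) (k : Nat) :
    pvW sa g k = (if 0 ≤ (pvBpAt sa g k).2 then pvW sa g (pvBpAt sa g k).2.toNat else [])
      ++ [PySem.List.pyGetD sa (k : Int) (0, 0)] := by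
  show pvWf sa g (k + 1) k = _
  simp only [pvWf]
  by_cases h0 : 0 ≤ (pvBpAt sa g k).2
  · rw [if_pos h0, if_pos h0]
    rcases pvPrev_cases sa g k with h | h
    · rw [h] at h0; omega
    · have hlt : (pvBpAt sa g k).2.toNat < k := by omega
      rw [pvWf_congr sa g (pvBpAt sa g k).2.toNat k ((pvBpAt sa g k).2.toNat + 1) hlt
        (by omega)]
      rfl
  · rw [if_neg h0, if_neg h0]

theorem pvW_last (sa : List (Int × Int)) (g : Int) (k : Nat) (d : Int × Int) :
    PySem.List.pyGetD (pvW sa g k) (-1) d = PySem.List.pyGetD sa (k : Int) (0, 0) := by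
  rw [pvW_rec]
  exact PySem.List.pyGetD_neg_one_append_singleton _ _ _

theorem pvLenW (sa : List (Int × Int)) (g : Int) (k : Nat) :
    ((pvW sa g k).length : Int) = pvDpS sa g k := by
  induction k using Nat.strong_induction_on with
  | _ k ih =>
    rw [pvW_rec]
    rcases pvPrev_cases sa g k with h | h
    · rw [if_neg (by rw [h]; omega)]
      unfold pvDpS
      rw [h]
      simp
    · rw [if_pos h.1]
      have hlt : (pvBpAt sa g k).2.toNat < k := by omega
      unfold pvDpS
      rw [h.2.2, ← ih _ hlt]
      simp

theorem pvW_len_pos (sa : List (Int × Int)) (g : Int) (k : Nat) : 0 < (pvW sa g k).length := by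
  have h1 := pvLenW sa g k
  have h2 := pvOne_le_dpS sa g k
  omega

-- simulation relation: the (score, index) DP state vs the materialized pick chain
def pvRel (sa : List (Int × Int)) (g : Int) (s : Int × Int) (p : List (Int × Int)) : Prop :=
  s.1 = (p.length : Int) + 1 ∧ ((s.2 = -1 ∧ p = []) ∨ (0 ≤ s.2 ∧ p = pvW sa g s.2.toNat))

theorem pvStep_sim (sa : List (Int × Int)) (g : Int) (m : Nat) (s : Int × Int)
    (p : List (Int × Int)) (h : pvRel sa g s p) (k : Nat) :
    pvRel sa g
      (pvStepGE (fun j => pvVld sa g j (m : Int)) (fun j => pvDpS sa g j.toNat + 1) s (k : Int))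
      (pvPkStep g (PySem.List.pyGetD sa (m : Int) (0, 0)) p (pvW sa g k)) := by
  unfold pvPkStep
  simp only [pvW_last]
  have hiff :
      ((fun j => pvVld sa g j (m : Int)) (k : Int) = true
        ∧ (fun j => pvDpS sa g j.toNat + 1) (k : Int) ≥ s.1)
      ↔ ((PySem.List.pyGetD sa (k : Int) (0, 0)).1 < (PySem.List.pyGetD sa (m : Int) (0, 0)).1
        ∧ (PySem.List.pyGetD sa (k : Int) (0, 0)).2 < (PySem.List.pyGetD sa (m : Int) (0, 0)).2
        ∧ |((PySem.List.pyGetD sa (m : Int) (0, 0)).1 - (PySem.List.pyGetD sa (k : Int) (0, 0)).1)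
            - ((PySem.List.pyGetD sa (m : Int) (0, 0)).2 - (PySem.List.pyGetD sa (k : Int) (0, 0)).2)| ≤ g
        ∧ p.length ≤ (pvW sa g k).length) := by
    simp only [pvVld, decide_eq_true_eq, Int.toNat_natCast]
    have hl := pvLenW sa g k
    have hs1 := h.1
    constructor
    · rintro ⟨⟨h1, h2, h3⟩, h4⟩
      exact ⟨h1, h2, h3, by omega⟩
    · rintro ⟨h1, h2, h3, h4⟩
      exact ⟨⟨h1, h2, h3⟩, by omega⟩
  unfold pvStepGE
  by_cases hc : (fun j => pvVld sa g j (m : Int)) (k : Int) = true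
      ∧ (fun j => pvDpS sa g j.toNat + 1) (k : Int) ≥ s.1
  · rw [if_pos hc, if_pos (hiff.mp hc)]
    refine ⟨?_, Or.inr ⟨by positivity, by simp⟩⟩
    have hl := pvLenW sa g k
    simp only [Int.toNat_natCast]
    omega
  · rw [if_neg hc, if_neg (fun hx => hc (hiff.mpr hx))]
    exact h

theorem pvFold_sim (sa : List (Int × Int)) (g : Int) (m : Nat) (l : List Nat)
    (s : Int × Int) (p : List (Int × Int)) (h : pvRel sa g s p) :
    pvRel sa g
      (l.foldl (fun s (k : Nat) => pvStepGE (fun j => pvVld sa g j (m : Int))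
        (fun j => pvDpS sa g j.toNat + 1) s (k : Int)) s)
      (l.foldl (fun p k =>
        pvPkStep g (PySem.List.pyGetD sa (m : Int) (0, 0)) p (pvW sa g k)) p) := by
  induction l generalizing s p with
  | nil => exact h
  | cons x t ih =>
    simp only [List.foldl_cons]
    exact ih _ _ (pvStep_sim sa g m s p h x)

theorem pvPick_eq (sa : List (Int × Int)) (g : Int) (m : Nat) :
    pvRel sa g (pvBpAt sa g m)
      (pvPickB g (PySem.List.pyGetD sa (m : Int) (0, 0)) ((List.range m).map (pvW sa g))) := by
  have h := pvFold_sim sa g m (List.range m) (1, -1) [] ⟨by simp, Or.inl ⟨rfl, rfl⟩⟩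
  unfold pvPickB
  rw [pvBpAt_char, PySem.List.pyRange_zero_nat, List.foldl_map, List.foldl_map]
  exact h

-- B's running best chain
def pvBest (sa : List (Int × Int)) (g : Int) : Nat → List (Int × Int)
  | 0 => []
  | m + 1 => if (pvBest sa g m).length < (pvW sa g m).length then pvW sa g m else pvBest sa g m

theorem pvB_take_loop (sa : List (Int × Int)) (g : Int) (m : Nat) (hm : m ≤ sa.length) :
    (sa.take m).foldl (pvStepChainB g) ([], [])
      = ((List.range m).map (pvW sa g), pvBest sa g m) := by
  induction m with
  | zero => rfl
  | succ m ih =>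
    have hmn : m < sa.length := by omega
    rw [List.take_add_one, List.getElem?_eq_getElem hmn]
    simp only [Option.toList_some, List.foldl_append, List.foldl_cons, List.foldl_nil,
      ih (by omega)]
    have hval : sa[m] = PySem.List.pyGetD sa (m : Int) (0, 0) := by
      rw [PySem.List.pyGetD_eq_getElem _ _ (by positivity) (by exact_mod_cast hmn)]
      simp
    unfold pvStepChainB
    simp only [hval]
    have hrel := pvPick_eq sa g m
    have hcur : pvPickB g (PySem.List.pyGetD sa (m : Int) (0, 0)) ((List.range m).map (pvW sa g))
        ++ [PySem.List.pyGetD sa (m : Int) (0, 0)] = pvW sa g m := by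
      rcases hrel.2 with ⟨h1, h2⟩ | ⟨h1, h2⟩
      · rw [h2, pvW_rec sa g m, if_neg (by omega)]
      · rw [h2, pvW_rec sa g m, if_pos h1]
    rw [hcur]
    simp only [Prod.mk.injEq]
    constructor
    · rw [List.range_succ]
      simp
    · rfl

-- A's backtracking, written front-to-back
def pvWalk (sa : List (Int × Int)) (prev : List Int) : Nat → Int → List (Int × Int) → List (Int × Int)
  | 0, _, acc => acc
  | fuel + 1, idx, acc =>
      if 0 ≤ idx then
        pvWalk sa prev fuel (PySem.List.pyGetD prev idx (-1)) (PySem.List.pyGetD sa idx (0, 0) :: acc)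
      else acc

theorem pvRecon_eq_walk (sa : List (Int × Int)) (prev : List Int) (fuel : Nat) :
    ∀ (idx : Int) (acc : List (Int × Int)),
      (pvReconA sa prev fuel idx acc).reverse = pvWalk sa prev fuel idx acc.reverse := by
  induction fuel with
  | zero => intro idx acc; rfl
  | succ fuel ih =>
    intro idx acc
    unfold pvReconA pvWalk
    split
    · rw [ih]
      simp
    · rfl

theorem pvWalk_neg (sa : List (Int × Int)) (prev : List Int) (fuel : Nat) (idx : Int)
    (acc : List (Int × Int)) (h : ¬ 0 ≤ idx) : pvWalk sa prev fuel idx acc = acc := by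
  cases fuel with
  | zero => rfl
  | succ fuel => unfold pvWalk; rw [if_neg h]

theorem pvWalk_eq_W (sa : List (Int × Int)) (g : Int) :
    ∀ (k : Nat), k < sa.length → ∀ (fuel : Nat), k < fuel → ∀ (acc : List (Int × Int)),
      pvWalk sa (pvPlA sa g sa.length sa.length) fuel (k : Int) acc = pvW sa g k ++ acc := by
  intro k
  induction k using Nat.strong_induction_on with
  | _ k ih =>
    intro hk fuel hfuel acc
    match fuel with
    | fuel + 1 =>
      unfold pvWalk
      rw [if_pos (by positivity)]
      have hprev : PySem.List.pyGetD (pvPlA sa g sa.length sa.length) (k : Int) (-1)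
          = (pvBpAt sa g k).2 := by
        unfold pvPlA
        rw [pvPyGetD_map_range _ _ _ (by positivity) (by exact_mod_cast hk) (-1)]
        simp [hk]
      rw [hprev]
      rcases pvPrev_cases sa g k with h | h
      · rw [h]
        rw [pvWalk_neg sa _ fuel (-1) _ (by omega)]
        rw [pvW_rec sa g k, if_neg (by rw [h]; omega)]
        rfl
      · have hlt : (pvBpAt sa g k).2.toNat < k := by omega
        have hcast : (pvBpAt sa g k).2 = (((pvBpAt sa g k).2.toNat : Nat) : Int) := by omega
        rw [hcast, ih _ hlt (by omega) fuel (by omega)]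
        rw [pvW_rec sa g k, if_pos h.1]
        simp

-- the max? fold over indices vs B's running best
def pvKeyD (sa : List (Int × Int)) (g : Int) (x : Int) : Int :=
  PySem.List.pyGetD (pvDlA sa g sa.length sa.length) x 0

theorem pvKeyD_eq (sa : List (Int × Int)) (g : Int) (j : Nat) (hj : j < sa.length) :
    pvKeyD sa g (j : Int) = pvDpS sa g j := by
  unfold pvKeyD pvDlA
  rw [pvPyGetD_map_range _ _ _ (by positivity) (by exact_mod_cast hj) 0]
  simp [hj]

theorem pvMax_loop (sa : List (Int × Int)) (g : Int) (m : Nat) (hm : m ≤ sa.length) :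
    (PySem.List.max? (PySem.List.pyRange 0 (m : Int) 1) (pvKeyD sa g) = none ∧ pvBest sa g m = [])
    ∨ (∃ j : Nat, j < sa.length
        ∧ PySem.List.max? (PySem.List.pyRange 0 (m : Int) 1) (pvKeyD sa g) = some (j : Int)
        ∧ pvBest sa g m = pvW sa g j) := by
  induction m with
  | zero =>
    left
    constructor
    · rw [PySem.List.pyRange_one_eq_nil (by norm_num)]
      rfl
    · rfl
  | succ m ih =>
    have hmn : m < sa.length := by omega
    have hcast : ((m + 1 : Nat) : Int) = (m : Int) + 1 := by push_cast; ring
    unfold PySem.List.max? at *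
    rw [hcast, PySem.List.pyRange_one_succ_right (by positivity), List.foldl_append]
    simp only [List.foldl_cons, List.foldl_nil]
    rcases ih (by omega) with ⟨h1, h2⟩ | ⟨j, hj, h1, h2⟩
    · rw [h1]
      right
      refine ⟨m, hmn, rfl, ?_⟩
      simp only [pvBest]
      rw [h2, if_pos (by simpa using pvW_len_pos sa g m)]
    · rw [h1]
      right
      have hkj := pvKeyD_eq sa g j hj
      have hkm := pvKeyD_eq sa g m hmn
      have hlj := pvLenW sa g j
      have hlm := pvLenW sa g m
      by_cases hlt : pvKeyD sa g (j : Int) < pvKeyD sa g (m : Int)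
      · refine ⟨m, hmn, by simp [hlt], ?_⟩
        simp only [pvBest]
        rw [h2, if_pos (by rw [hkj, hkm] at hlt; omega)]
      · refine ⟨j, hj, by simp [hlt], ?_⟩
        simp only [pvBest]
        rw [h2, if_neg (by rw [hkj, hkm] at hlt; omega)]

-- the two _chain implementations agree
theorem pvChain_eq (path_min_ids query_min_ids : List Int) (g : Int) :
    pvChainDpA path_min_ids query_min_ids g = pvBestChainB path_min_ids query_min_ids g := by
  unfold pvChainDpA pvBestChainB
  simp only [PySem.List.foldl_append_singleton_eq_map, PySem.List.foldl_append_eq_flatMap,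
    List.nil_append]
  set d : PySem.Dict Int (List Int) :=
    (PySem.List.enumerate path_min_ids 0).foldl
      (fun d p => d.modify p.2 [] (fun l => l ++ [p.1])) PySem.Dict.empty with hd
  set anch : List (Int × Int) :=
    (PySem.List.enumerate query_min_ids 0).flatMap
      (fun p => (d.getD p.2 []).map (fun pp => (pp, p.1))) with hanch
  have hperm := PySem.List.sorted2_perm anch Prod.fst Prod.snd false
  rcases eq_or_ne anch [] with hnil | hne
  · have hs : PySem.List.sorted2 anch Prod.fst Prod.snd = [] := by
      apply List.eq_nil_of_length_eq_zero
      rw [hperm.length_eq, hnil]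
      rfl
    rw [if_pos hnil, hs]
    rfl
  · rw [if_neg hne]
    set sa := PySem.List.sorted2 anch Prod.fst Prod.snd with hsa
    have hsane : sa ≠ [] := by
      intro hcon
      apply hne
      apply List.eq_nil_of_length_eq_zero
      rw [← hperm.length_eq, hcon]
      rfl
    rw [pvA_loop sa g sa.length (le_refl _)]
    have hB : (sa.foldl (pvStepChainB g) ([], [])).2 = pvBest sa g sa.length := by
      have h := pvB_take_loop sa g sa.length (le_refl _)
      rw [List.take_length] at h
      rw [h]
    rw [hB]
    rcases pvMax_loop sa g sa.length (le_refl _) with ⟨h1, _⟩ | ⟨j, hj, h1, h2⟩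
    · exfalso
      rw [PySem.List.max?_eq_none_iff] at h1
      have := congrArg List.length h1
      rw [PySem.List.length_pyRange_one] at this
      simp at this
      exact hsane this
    · show (pvReconA sa (pvPlA sa g sa.length sa.length) (sa.length + 1)
          ((PySem.List.max? (PySem.List.pyRange 0 (sa.length : Int) 1)
            (fun x => PySem.List.pyGetD (pvDlA sa g sa.length sa.length) x 0)).getD 0) []).reverse
        = pvBest sa g sa.length
      have hkey : (fun x => PySem.List.pyGetD (pvDlA sa g sa.length sa.length) x 0) = pvKeyD sa g := rfl
      rw [hkey, h1, h2]
      show (pvReconA sa (pvPlA sa g sa.length sa.length) (sa.length + 1) (j : Int) []).reverse = _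
      rw [pvRecon_eq_walk]
      rw [show (([] : List (Int × Int)).reverse) = ([] : List (Int × Int)) from rfl]
      rw [pvWalk_eq_W sa g j hj (sa.length + 1) (by omega) []]
      simp

-- ===== VERDICT (by name: the statement is the Claim_ definition above) =====
theorem align_read_to_path_spec : Claim_equal_align_read_to_path := by
  intro p r g _
  unfold Spec_align_read_to_path align_read_to_path align_read_to_path_alt
  rw [pvChain_eq, pvChain_eq]
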